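-- pv_equiv track=rewrite | github.com/DanielTeshager/specs | runtime/primitives.py | find_at_depth_0
-- ===== SOURCE A (Python) =====
-- def find_at_depth_0(expr: str, target: str, rightmost: bool = False) -> int:
--     """Find target string in expr only at depth 0 (outside parens/brackets)"""
--     depth = 0
--     found = -1
--     i = 0
--     while i < len(expr) - len(target) + 1:
--         c = expr[i]
--         if c in "([{":
--             depth += 1
--         elif c in ")]}":
--             depth -= 1
--         elif depth == 0 and expr[i:i+len(target)] == target:
--             if rightmost:
--                 found = i
--             else:
--                 return i
--         i += 1
--     return found
-- ===== SOURCE B (Python) =====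
-- def find_at_depth_0(expr: str, target: str, rightmost: bool = False) -> int:
--     """Two-pass version: prefix bracket-depth table, then a scan over start
--     positions (descending when rightmost, so the first hit is the answer)."""
--     n, m = len(expr), len(target)
--     depth = [0]
--     for c in expr:
--         d = depth[-1]
--         if c in "([{":
--             d += 1
--         elif c in ")]}":
--             d -= 1
--         depth.append(d)
--     positions = range(n - m + 1)
--     if rightmost:
--         positions = reversed(positions)
--     for i in positions:
--         c = expr[i]
--         if c not in "([{" and c not in ")]}" and depth[i] == 0 and expr[i:i + m] == target:
--             return i
--     return -1
-- ===== Notes on version B (the rewrite author's own statement) =====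
-- stated objective: alternative
-- what changed: Replaces the single interleaved loop that tracks depth and a 'found' register with a two-pass scheme: a prefix pass builds a bracket-depth table, then a separate scan over start positions (descending for rightmost, so the first hit returns immediately) tests depth-0 matches.
-- outside the precondition, e.g. on find_at_depth_0('ab', '', False): A returns 0, B returns 0
import Mathlib
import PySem

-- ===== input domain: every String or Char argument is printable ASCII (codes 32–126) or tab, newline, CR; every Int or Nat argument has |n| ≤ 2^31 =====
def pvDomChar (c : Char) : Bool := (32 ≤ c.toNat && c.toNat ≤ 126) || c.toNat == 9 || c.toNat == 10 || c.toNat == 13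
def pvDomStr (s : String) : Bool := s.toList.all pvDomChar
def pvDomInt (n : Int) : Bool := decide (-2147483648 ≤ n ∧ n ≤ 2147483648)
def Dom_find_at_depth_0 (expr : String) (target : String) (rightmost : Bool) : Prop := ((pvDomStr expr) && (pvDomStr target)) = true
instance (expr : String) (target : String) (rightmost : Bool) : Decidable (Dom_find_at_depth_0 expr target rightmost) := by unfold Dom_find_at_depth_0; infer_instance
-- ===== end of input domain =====

-- B replaces A's interleaved depth-tracking loop by a prefix depth table plus a separate
-- position scan (descending for rightmost); same results, an alternative decomposition.

-- ===== PORT A =====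
-- shared char-class helpers (both Pythons test membership in "([{" / ")]}")
def pvOpen (c : Char) : Bool := ['(', '[', '{'].contains c
def pvClose (c : Char) : Bool := [')', ']', '}'].contains c

-- A's while-loop; `bound` is len(expr)-len(target)+1 (as a Nat: for len(target) > len(expr)+1
-- Python's bound is negative and the loop is skipped, matching Nat-subtraction 0).
-- `(cs[i]?).getD ' '` is expr[i]; the default is unreachable under Pre_ (target ≠ "" gives bound ≤ len(expr)).
def find_at_depth_0_go (cs tgt : List Char) (rightmost : Bool) (bound : Nat) (i : Nat) (depth : Int) (found : Int) : Int :=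
  if h : i < bound then
    let c := (cs[i]?).getD ' '
    if pvOpen c then find_at_depth_0_go cs tgt rightmost bound (i+1) (depth+1) found
    else if pvClose c then find_at_depth_0_go cs tgt rightmost bound (i+1) (depth-1) found
    else if depth = 0 ∧ (cs.drop i).take tgt.length = tgt then
      if rightmost then find_at_depth_0_go cs tgt rightmost bound (i+1) depth i
      else (i : Int)
    else find_at_depth_0_go cs tgt rightmost bound (i+1) depth found
  else found
termination_by bound - i

def find_at_depth_0 (expr : String) (target : String) (rightmost : Bool) : Int :=
  find_at_depth_0_go expr.toList target.toList rightmost (expr.toList.length + 1 - target.toList.length) 0 0 (-1)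

-- ===== PORT B =====
-- the depth-table step of Source B's first loop
def pvStep (d : Int) (c : Char) : Int := if pvOpen c then d + 1 else if pvClose c then d - 1 else d

def find_at_depth_0_alt (expr : String) (target : String) (rightmost : Bool) : Int :=
  let cs := expr.toList
  let tgt := target.toList
  let n := cs.length
  let m := tgt.length
  let depth := cs.scanl pvStep 0
  let pred := fun (i : Nat) =>
    !pvOpen ((cs[i]?).getD ' ') && !pvClose ((cs[i]?).getD ' ') &&
    decide ((depth[i]?).getD 0 = 0) && decide ((cs.drop i).take m = tgt)
  let positions := if rightmost then (List.range (n + 1 - m)).reverse else List.range (n + 1 - m)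
  match positions.find? pred with
  | some i => (i : Int)
  | none => -1

-- ===== PRECONDITION & SPEC =====
-- Pre_ excludes empty targets: there A's loop runs one position past the end of expr and
-- raises IndexError unless an early return fires first (B behaves the same way).
def Pre_find_at_depth_0 (expr : String) (target : String) (rightmost : Bool) : Prop := target ≠ ""
instance (expr : String) (target : String) (rightmost : Bool) : Decidable (Pre_find_at_depth_0 expr target rightmost) := by unfold Pre_find_at_depth_0; infer_instance
def pvWitness_find_at_depth_0 : String × String × Bool := ("(a+b)+c", "+", true)

def Spec_find_at_depth_0 (expr : String) (target : String) (rightmost : Bool) (out : Int) : Prop := out = find_at_depth_0_alt expr target rightmost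
instance (expr : String) (target : String) (rightmost : Bool) (out : Int) : Decidable (Spec_find_at_depth_0 expr target rightmost out) := by unfold Spec_find_at_depth_0; infer_instance

-- ===== CLAIM (what is proved, stated in full; the proofs are below) =====
def Claim_equal_find_at_depth_0 : Prop := ∀ (expr : String) (target : String) (rightmost : Bool), Dom_find_at_depth_0 expr target rightmost → Pre_find_at_depth_0 expr target rightmost → Spec_find_at_depth_0 expr target rightmost (find_at_depth_0 expr target rightmost)

-- ===== LEMMAS AND PROOFS =====

-- depth of the prefix of length i
def pvD (cs : List Char) (i : Nat) : Int := (cs.take i).foldl pvStep 0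

-- the match predicate phrased with pvD
def pvPred (cs tgt : List Char) (i : Nat) : Bool :=
  !pvOpen ((cs[i]?).getD ' ') && !pvClose ((cs[i]?).getD ' ') &&
  decide (pvD cs i = 0) && decide ((cs.drop i).take tgt.length = tgt)

theorem pvScanl_getD (cs : List Char) (d : Int) (i : Nat) (h : i ≤ cs.length) :
    ((cs.scanl pvStep d)[i]?).getD 0 = (cs.take i).foldl pvStep d := by
  induction cs generalizing d i with
  | nil =>
    have h0 : i = 0 := Nat.le_zero.mp h
    subst h0
    simp [List.scanl]
  | cons a l ih =>
    cases i with
    | zero => simp [List.scanl_cons]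
    | succ j =>
      rw [List.scanl_cons, List.take_succ_cons, List.foldl_cons]
      simpa using ih (pvStep d a) j (by simpa using h)

theorem pvD_succ (cs : List Char) (i : Nat) (h : i < cs.length) :
    pvD cs (i+1) = pvStep (pvD cs i) ((cs[i]?).getD ' ') := by
  have ht : cs.take (i+1) = cs.take i ++ [(cs[i]?).getD ' '] := by
    rw [List.take_succ, List.getElem?_eq_getElem h]
    rfl
  unfold pvD
  rw [ht, List.foldl_append]
  rfl

theorem pvFind?_congr {p q : Nat → Bool} (l : List Nat) (h : ∀ a ∈ l, p a = q a) :
    l.find? p = l.find? q := by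
  induction l with
  | nil => rfl
  | cons a t ih =>
    have ha := h a (by simp)
    simp only [List.find?, ha]
    cases q a <;> simp_all

-- one-step unfolding equations for A's loop
theorem pvGo_stop (cs tgt : List Char) (rm : Bool) (bound i : Nat) (depth found : Int)
    (h : ¬ i < bound) :
    find_at_depth_0_go cs tgt rm bound i depth found = found := by
  rw [find_at_depth_0_go]; simp [h]

theorem pvGo_open (cs tgt : List Char) (rm : Bool) (bound i : Nat) (depth found : Int)
    (h : i < bound) (ho : pvOpen ((cs[i]?).getD ' ') = true) :
    find_at_depth_0_go cs tgt rm bound i depth found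
      = find_at_depth_0_go cs tgt rm bound (i+1) (depth+1) found := by
  rw [find_at_depth_0_go]; simp [h, ho]

theorem pvGo_close (cs tgt : List Char) (rm : Bool) (bound i : Nat) (depth found : Int)
    (h : i < bound) (ho : pvOpen ((cs[i]?).getD ' ') = false)
    (hc : pvClose ((cs[i]?).getD ' ') = true) :
    find_at_depth_0_go cs tgt rm bound i depth found
      = find_at_depth_0_go cs tgt rm bound (i+1) (depth-1) found := by
  rw [find_at_depth_0_go]; simp [h, ho, hc]

theorem pvGo_skip (cs tgt : List Char) (rm : Bool) (bound i : Nat) (depth found : Int)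
    (h : i < bound) (ho : pvOpen ((cs[i]?).getD ' ') = false)
    (hc : pvClose ((cs[i]?).getD ' ') = false)
    (hm : ¬ (depth = 0 ∧ (cs.drop i).take tgt.length = tgt)) :
    find_at_depth_0_go cs tgt rm bound i depth found
      = find_at_depth_0_go cs tgt rm bound (i+1) depth found := by
  rw [find_at_depth_0_go]; simp [h, ho, hc, hm]

theorem pvGo_hitL (cs tgt : List Char) (bound i : Nat) (depth found : Int)
    (h : i < bound) (ho : pvOpen ((cs[i]?).getD ' ') = false)
    (hc : pvClose ((cs[i]?).getD ' ') = false)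
    (hm : depth = 0 ∧ (cs.drop i).take tgt.length = tgt) :
    find_at_depth_0_go cs tgt false bound i depth found = (i : Int) := by
  rw [find_at_depth_0_go]; simp [h, ho, hc, hm]

theorem pvGo_hitR (cs tgt : List Char) (bound i : Nat) (depth found : Int)
    (h : i < bound) (ho : pvOpen ((cs[i]?).getD ' ') = false)
    (hc : pvClose ((cs[i]?).getD ' ') = false)
    (hm : depth = 0 ∧ (cs.drop i).take tgt.length = tgt) :
    find_at_depth_0_go cs tgt true bound i depth found
      = find_at_depth_0_go cs tgt true bound (i+1) depth i := by
  rw [find_at_depth_0_go]; simp [h, ho, hc, hm]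

theorem pvGo_left (cs tgt : List Char) (bound : Nat) (hb : bound ≤ cs.length) :
    ∀ k i f, bound ≤ i + k →
    find_at_depth_0_go cs tgt false bound i (pvD cs i) f =
      (match (List.range' i (bound - i)).find? (pvPred cs tgt) with
       | some j => (j : Int) | none => f) := by
  intro k
  induction k with
  | zero =>
    intro i f hik
    rw [pvGo_stop cs tgt false bound i _ f (by omega),
      Nat.sub_eq_zero_of_le (by omega : bound ≤ i)]
    rfl
  | succ k ih =>
    intro i f hik
    by_cases hlt : i < bound
    · have hrange : List.range' i (bound - i) = i :: List.range' (i+1) (bound - (i+1)) := by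
        have h' : bound - i = (bound - (i+1)) + 1 := by omega
        rw [h', List.range'_succ]
      have hil : i < cs.length := by omega
      have hstep := pvD_succ cs i hil
      by_cases ho : pvOpen ((cs[i]?).getD ' ')
      · have hp : pvPred cs tgt i = false := by
          simp only [pvPred, ho, Bool.not_true, Bool.false_and]
        have hd : pvD cs (i+1) = pvD cs i + 1 := by rw [hstep]; simp [pvStep, ho]
        rw [pvGo_open cs tgt false bound i _ f hlt ho, ← hd, ih (i+1) f (by omega),
          hrange, List.find?_cons_of_neg (by simp [hp])]
      · by_cases hc : pvClose ((cs[i]?).getD ' ')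
        · have ho2 : pvOpen ((cs[i]?).getD ' ') = false := by simpa using ho
          have hp : pvPred cs tgt i = false := by
            simp only [pvPred, hc, Bool.not_true, Bool.and_false, Bool.false_and]
          have hd : pvD cs (i+1) = pvD cs i - 1 := by rw [hstep]; simp [pvStep, ho2, hc]
          rw [pvGo_close cs tgt false bound i _ f hlt ho2 hc, ← hd, ih (i+1) f (by omega),
            hrange, List.find?_cons_of_neg (by simp [hp])]
        · have ho' : pvOpen ((cs[i]?).getD ' ') = false := by simpa using ho
          have hc' : pvClose ((cs[i]?).getD ' ') = false := by simpa using hc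
          have hD : pvD cs (i+1) = pvD cs i := by rw [hstep]; simp [pvStep, ho', hc']
          by_cases hm : pvD cs i = 0 ∧ (cs.drop i).take tgt.length = tgt
          · have hp : pvPred cs tgt i = true := by
              simp only [pvPred, ho', hc', Bool.not_false, hm.1, hm.2,
                decide_true, Bool.and_self]
            rw [pvGo_hitL cs tgt bound i _ f hlt ho' hc' hm, hrange,
              List.find?_cons_of_pos hp]
          · have hp : pvPred cs tgt i = false := by
              simp only [pvPred, ho', hc', Bool.not_false, Bool.true_and]
              rcases not_and_or.mp hm with h' | h' <;> simp [h']
            rw [pvGo_skip cs tgt false bound i _ f hlt ho' hc' hm, ← hD,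
              ih (i+1) f (by omega), hrange, List.find?_cons_of_neg (by simp [hp])]
    · rw [pvGo_stop cs tgt false bound i _ f hlt,
        Nat.sub_eq_zero_of_le (by omega : bound ≤ i)]
      rfl

theorem pvGo_right (cs tgt : List Char) (bound : Nat) (hb : bound ≤ cs.length) :
    ∀ k i f, bound ≤ i + k →
    find_at_depth_0_go cs tgt true bound i (pvD cs i) f =
      (match (List.range' i (bound - i)).reverse.find? (pvPred cs tgt) with
       | some j => (j : Int) | none => f) := by
  intro k
  induction k with
  | zero =>
    intro i f hik
    rw [pvGo_stop cs tgt true bound i _ f (by omega),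
      Nat.sub_eq_zero_of_le (by omega : bound ≤ i)]
    rfl
  | succ k ih =>
    intro i f hik
    by_cases hlt : i < bound
    · have hrange : (List.range' i (bound - i)).reverse
          = (List.range' (i+1) (bound - (i+1))).reverse ++ [i] := by
        have h' : bound - i = (bound - (i+1)) + 1 := by omega
        rw [h', List.range'_succ]
        simp
      have hil : i < cs.length := by omega
      have hstep := pvD_succ cs i hil
      by_cases ho : pvOpen ((cs[i]?).getD ' ')
      · have hp : pvPred cs tgt i = false := by
          simp only [pvPred, ho, Bool.not_true, Bool.false_and]
        have hd : pvD cs (i+1) = pvD cs i + 1 := by rw [hstep]; simp [pvStep, ho]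
        rw [pvGo_open cs tgt true bound i _ f hlt ho, ← hd, ih (i+1) f (by omega),
          hrange, List.find?_append,
          show List.find? (pvPred cs tgt) [i] = none from List.find?_cons_of_neg (by simp [hp])]
        cases (List.range' (i+1) (bound - (i+1))).reverse.find? (pvPred cs tgt) <;> rfl
      · by_cases hc : pvClose ((cs[i]?).getD ' ')
        · have ho2 : pvOpen ((cs[i]?).getD ' ') = false := by simpa using ho
          have hp : pvPred cs tgt i = false := by
            simp only [pvPred, hc, Bool.not_true, Bool.and_false, Bool.false_and]
          have hd : pvD cs (i+1) = pvD cs i - 1 := by rw [hstep]; simp [pvStep, ho2, hc]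
          rw [pvGo_close cs tgt true bound i _ f hlt ho2 hc, ← hd, ih (i+1) f (by omega),
            hrange, List.find?_append,
            show List.find? (pvPred cs tgt) [i] = none from List.find?_cons_of_neg (by simp [hp])]
          cases (List.range' (i+1) (bound - (i+1))).reverse.find? (pvPred cs tgt) <;> rfl
        · have ho' : pvOpen ((cs[i]?).getD ' ') = false := by simpa using ho
          have hc' : pvClose ((cs[i]?).getD ' ') = false := by simpa using hc
          have hD : pvD cs (i+1) = pvD cs i := by rw [hstep]; simp [pvStep, ho', hc']
          by_cases hm : pvD cs i = 0 ∧ (cs.drop i).take tgt.length = tgt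
          · have hp : pvPred cs tgt i = true := by
              simp only [pvPred, ho', hc', Bool.not_false, hm.1, hm.2,
                decide_true, Bool.and_self]
            rw [pvGo_hitR cs tgt bound i _ f hlt ho' hc' hm, ← hD,
              ih (i+1) i (by omega), hrange, List.find?_append,
              show List.find? (pvPred cs tgt) [i] = some i from List.find?_cons_of_pos hp]
            cases (List.range' (i+1) (bound - (i+1))).reverse.find? (pvPred cs tgt) <;> rfl
          · have hp : pvPred cs tgt i = false := by
              simp only [pvPred, ho', hc', Bool.not_false, Bool.true_and]
              rcases not_and_or.mp hm with h' | h' <;> simp [h']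
            rw [pvGo_skip cs tgt true bound i _ f hlt ho' hc' hm, ← hD,
              ih (i+1) f (by omega), hrange, List.find?_append,
              show List.find? (pvPred cs tgt) [i] = none from List.find?_cons_of_neg (by simp [hp])]
            cases (List.range' (i+1) (bound - (i+1))).reverse.find? (pvPred cs tgt) <;> rfl
    · rw [pvGo_stop cs tgt true bound i _ f hlt,
        Nat.sub_eq_zero_of_le (by omega : bound ≤ i)]
      rfl

-- ===== VERDICT (by name: the statement is the Claim_ definition above) =====
theorem find_at_depth_0_spec : Claim_equal_find_at_depth_0 := by
  intro expr target rightmost _ hpre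
  unfold Spec_find_at_depth_0 find_at_depth_0
  set cs := expr.toList with hcs
  set tgt := target.toList with htgt
  have htne : tgt ≠ [] := by
    rw [htgt]
    simpa using hpre
  have hm1 : 1 ≤ tgt.length := List.length_pos_iff.mpr htne
  have hb : cs.length + 1 - tgt.length ≤ cs.length := by omega
  have halt : find_at_depth_0_alt expr target rightmost =
      (match (if rightmost then (List.range (cs.length + 1 - tgt.length)).reverse
              else List.range (cs.length + 1 - tgt.length)).find?
          (fun (i : Nat) =>
            !pvOpen ((cs[i]?).getD ' ') && !pvClose ((cs[i]?).getD ' ') &&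
            decide (((cs.scanl pvStep 0)[i]?).getD 0 = 0) &&
            decide ((cs.drop i).take tgt.length = tgt)) with
       | some i => (i : Int) | none => -1) := rfl
  have hpred : ∀ j ∈ List.range (cs.length + 1 - tgt.length),
      (fun (i : Nat) =>
        !pvOpen ((cs[i]?).getD ' ') && !pvClose ((cs[i]?).getD ' ') &&
        decide (((cs.scanl pvStep 0)[i]?).getD 0 = 0) &&
        decide ((cs.drop i).take tgt.length = tgt)) j
      = pvPred cs tgt j := by
    intro j hj
    have hjle : j ≤ cs.length := by
      have := List.mem_range.mp hj
      omega
    have hd0 : decide (((cs.scanl pvStep 0)[j]?).getD 0 = 0) = decide (pvD cs j = 0) :=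
      decide_eq_decide.mpr (iff_of_eq (by rw [pvScanl_getD cs 0 j hjle]; rfl))
    simp only [pvPred, hd0]
  rw [halt]
  cases rightmost with
  | false =>
    have key := pvGo_left cs tgt (cs.length + 1 - tgt.length) hb
      (cs.length + 1 - tgt.length) 0 (-1) (by omega)
    have e1 : find_at_depth_0_go cs tgt false (cs.length + 1 - tgt.length) 0 0 (-1)
        = find_at_depth_0_go cs tgt false (cs.length + 1 - tgt.length) 0 (pvD cs 0) (-1) := rfl
    rw [e1, key, Nat.sub_zero, if_neg (by simp), pvFind?_congr _ hpred,
      List.range_eq_range']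
  | true =>
    have key := pvGo_right cs tgt (cs.length + 1 - tgt.length) hb
      (cs.length + 1 - tgt.length) 0 (-1) (by omega)
    have e1 : find_at_depth_0_go cs tgt true (cs.length + 1 - tgt.length) 0 0 (-1)
        = find_at_depth_0_go cs tgt true (cs.length + 1 - tgt.length) 0 (pvD cs 0) (-1) := rfl
    have hpred' : ∀ j ∈ (List.range (cs.length + 1 - tgt.length)).reverse,
        (fun (i : Nat) =>
          !pvOpen ((cs[i]?).getD ' ') && !pvClose ((cs[i]?).getD ' ') &&
          decide (((cs.scanl pvStep 0)[i]?).getD 0 = 0) &&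
          decide ((cs.drop i).take tgt.length = tgt)) j
        = pvPred cs tgt j := by
      intro j hj
      exact hpred j (by simpa using hj)
    rw [e1, key, Nat.sub_zero, if_pos rfl, pvFind?_congr _ hpred',
      List.range_eq_range']
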